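-- pv_equiv track=rewrite | github.com/nobe0716/problem_solving | codeforces/contests/1373/D. Maximum Sum on Even Positions.py | solve
-- ===== SOURCE A (Python) =====
-- def solve(n, a):
--     if n == 1:
--         return a[0]
--     elif n == 2:
--         return max(a)
--     even_sum = sum(a[i] for i in range(0, n, 2))
--     la, lb = [], []
--     for i in range(n - 1):
--         if i % 2 == 0:
--             la.append(-a[i] + a[i + 1])
--         else:
--             lb.append(a[i] - a[i + 1])
--
--     ta, tb = [la[0]], [lb[0]]
--     for e in la[1:]:
--         ta.append(max(e, ta[-1] + e))
--     for e in lb[1:]: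
--         tb.append(max(e, tb[-1] + e))
--     return even_sum + max(max(ta), max(tb), 0)
-- ===== SOURCE B (Python) =====
-- def _best_gain(d):
--     # maximum (nonempty) subarray sum of d, via prefix sums and a running prefix minimum
--     p = mn = 0
--     best = d[0]
--     for e in d:
--         p += e
--         best = max(best, p - mn)
--         mn = min(mn, p)
--     return best
--
--
-- def solve(n, a):
--     if n == 1:
--         return a[0]
--     if n == 2:
--         return max(a)
--     even_sum = sum(a[i] for i in range(0, n, 2))
--     gain_even = _best_gain([a[i + 1] - a[i] for i in range(0, n - 1, 2)])
--     gain_odd = _best_gain([a[i] - a[i + 1] for i in range(1, n - 1, 2)])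
--     return even_sum + max(gain_even, gain_odd, 0)
-- ===== Notes on version B (the rewrite author's own statement) =====
-- stated objective: alternative
-- what changed: Replaces A's build-then-scan (one parity-splitting loop materialising difference lists la/lb, then Kadane's recurrence cur=max(e,cur+e) appended into two scan lists ta/tb whose maxima are taken) with two stride-2 comprehensions fed to a helper computing the best nonempty subarray sum via prefix sums and a running prefix minimum (best = max over j of P[j] - min_{k<j} P[k]) in O(1) state, never building scan lists and never using the Kadane recurrence.
import Mathlib
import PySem

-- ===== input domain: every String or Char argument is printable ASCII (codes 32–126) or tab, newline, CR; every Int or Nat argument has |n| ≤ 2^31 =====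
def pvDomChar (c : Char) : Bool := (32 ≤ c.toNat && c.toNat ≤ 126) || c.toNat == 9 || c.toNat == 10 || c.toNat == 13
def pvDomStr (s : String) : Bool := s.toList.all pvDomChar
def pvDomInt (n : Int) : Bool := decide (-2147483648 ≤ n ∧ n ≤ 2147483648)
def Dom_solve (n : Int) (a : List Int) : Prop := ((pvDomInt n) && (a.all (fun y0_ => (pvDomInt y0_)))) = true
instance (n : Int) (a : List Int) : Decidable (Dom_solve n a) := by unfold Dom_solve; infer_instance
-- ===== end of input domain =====

-- B replaces A's build-then-scan (parity loop building la/lb + Kadane recurrence appended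
-- into scan lists ta/tb + list maxima) with two stride-2 difference comprehensions and a
-- prefix-sum/prefix-minimum helper; same return value on all inputs where A returns.


-- ===== PORT A =====
def solve (n : Int) (a : List Int) : Int :=
  if n == 1 then PySem.List.pyGetD a 0 0
  else if n == 2 then (PySem.List.max? a (fun x => x)).getD 0
  else
    let even_sum := (PySem.List.pyRange 0 n 2).foldl (fun s i => s + PySem.List.pyGetD a i 0) 0
    let lab := (PySem.List.pyRange 0 (n - 1) 1).foldl
      (fun (p : List Int × List Int) i =>
        if PySem.Int.mod i 2 == 0 then
          (p.1 ++ [-(PySem.List.pyGetD a i 0) + PySem.List.pyGetD a (i + 1) 0], p.2)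
        else
          (p.1, p.2 ++ [PySem.List.pyGetD a i 0 - PySem.List.pyGetD a (i + 1) 0])) ([], [])
    let ta := (PySem.List.slice lab.1 (some 1) none).foldl
      (fun acc e => acc ++ [max e (PySem.List.pyGetD acc (-1) 0 + e)]) [PySem.List.pyGetD lab.1 0 0]
    let tb := (PySem.List.slice lab.2 (some 1) none).foldl
      (fun acc e => acc ++ [max e (PySem.List.pyGetD acc (-1) 0 + e)]) [PySem.List.pyGetD lab.2 0 0]
    even_sum + max (max ((PySem.List.max? ta (fun x => x)).getD 0) ((PySem.List.max? tb (fun x => x)).getD 0)) 0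

-- ===== PORT B =====
-- helper: best nonempty subarray sum via prefix sums + running prefix minimum (B's _best_gain)
def solve_bestGain (d : List Int) : Int :=
  (d.foldl (fun (st : Int × Int × Int) e =>
      let p := st.1 + e
      (p, min st.2.1 p, max st.2.2 (p - st.2.1))) (0, 0, PySem.List.pyGetD d 0 0)).2.2

def solve_alt (n : Int) (a : List Int) : Int :=
  if n == 1 then PySem.List.pyGetD a 0 0
  else if n == 2 then (PySem.List.max? a (fun x => x)).getD 0
  else
    let even_sum := (PySem.List.pyRange 0 n 2).foldl (fun s i => s + PySem.List.pyGetD a i 0) 0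
    let gain_even := solve_bestGain ((PySem.List.pyRange 0 (n - 1) 2).map
      (fun i => PySem.List.pyGetD a (i + 1) 0 - PySem.List.pyGetD a i 0))
    let gain_odd := solve_bestGain ((PySem.List.pyRange 1 (n - 1) 2).map
      (fun i => PySem.List.pyGetD a i 0 - PySem.List.pyGetD a (i + 1) 0))
    even_sum + max (max gain_even gain_odd) 0

-- ===== PRECONDITION & SPEC =====
-- Pre_solve is exactly the set of inputs on which A returns normally: n = 1 or 2 needs a
-- nonempty list (a[0] / max(a)); otherwise A needs 3 ≤ n ≤ len(a) (indices up to n-1, and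
-- la[0]/lb[0] raise for n ≤ 0 since both lists would be empty).
def Pre_solve (n : Int) (a : List Int) : Prop :=
  (n = 1 ∧ a ≠ []) ∨ (n = 2 ∧ a ≠ []) ∨ (3 ≤ n ∧ n ≤ a.length)
instance (n : Int) (a : List Int) : Decidable (Pre_solve n a) := by unfold Pre_solve; infer_instance
def pvWitness_solve : Int × List Int := (5, [1, -2, 3, -4, 5])

def Spec_solve (n : Int) (a : List Int) (out : Int) : Prop := out = solve_alt n a
instance (n : Int) (a : List Int) (out : Int) : Decidable (Spec_solve n a out) := by unfold Spec_solve; infer_instance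

-- ===== CLAIM (what is proved, stated in full; the proofs are below) =====
def Claim_equal_solve : Prop := ∀ (n : Int) (a : List Int), Dom_solve n a → Pre_solve n a → Spec_solve n a (solve n a)

-- ===== LEMMAS AND PROOFS =====

-- the successive Kadane "cur" values over a list, starting from cur = c
def pvCurs : Int → List Int → List Int
  | _, [] => []
  | c, e :: t => max e (c + e) :: pvCurs (max e (c + e)) t

-- one combined Kadane step (cur, best)
def pvKStep (p : Int × Int) (e : Int) : Int × Int :=
  (max e (p.1 + e), max p.2 (max e (p.1 + e)))

-- B's prefix-sum step (p, running min of p, best)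
def pvPStep (st : Int × Int × Int) (e : Int) : Int × Int × Int :=
  (st.1 + e, min st.2.1 (st.1 + e), max st.2.2 (st.1 + e - st.2.1))

-- A's build step producing (la, lb)
def pvBStep (a : List Int) (p : List Int × List Int) (i : Int) : List Int × List Int :=
  if PySem.Int.mod i 2 == 0 then
    (p.1 ++ [-(PySem.List.pyGetD a i 0) + PySem.List.pyGetD a (i + 1) 0], p.2)
  else
    (p.1, p.2 ++ [PySem.List.pyGetD a i 0 - PySem.List.pyGetD a (i + 1) 0])

def pvFA (a : List Int) (i : Int) : Int := -(PySem.List.pyGetD a i 0) + PySem.List.pyGetD a (i + 1) 0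
def pvFB (a : List Int) (i : Int) : Int := PySem.List.pyGetD a i 0 - PySem.List.pyGetD a (i + 1) 0

theorem pvKad_snd (l : List Int) : ∀ (c b : Int), (l.foldl pvKStep (c, b)).2 = (pvCurs c l).foldl max b := by
  induction l with
  | nil => intro c b; rfl
  | cons e t ih =>
    intro c b
    simp only [List.foldl_cons, pvKStep, pvCurs, ih]

-- prefix-sum/prefix-min pass computes exactly Kadane's best
theorem pvPref (l : List Int) : ∀ (p mn b c : Int), mn ≤ p → p - mn = max c 0 →
    (l.foldl pvPStep (p, mn, b)).2.2 = (l.foldl pvKStep (c, b)).2 := by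
  induction l with
  | nil => intro p mn b c _ _; rfl
  | cons e t ih =>
    intro p mn b c h1 h2
    simp only [List.foldl_cons, pvPStep, pvKStep]
    have hbb : max b (p + e - mn) = max b (max e (c + e)) := by omega
    rw [hbb]
    exact ih _ _ _ _ (by omega) (by omega)

-- A's prefix-scan fold appends exactly the Kadane cur-values continuing from the last accumulator entry
theorem pvScan (t : List Int) : ∀ (acc : List Int) (h : acc ≠ []),
    t.foldl (fun acc e => acc ++ [max e (PySem.List.pyGetD acc (-1) 0 + e)]) acc
      = acc ++ pvCurs (acc.getLast h) t := by
  induction t with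
  | nil => intro acc h; simp [pvCurs]
  | cons e t ih =>
    intro acc h
    simp only [List.foldl_cons, PySem.List.pyGetD_neg_one acc 0 h]
    rw [ih (acc ++ [max e (acc.getLast h + e)]) (by simp)]
    simp [pvCurs]

-- range(0, t+1, 2) gains t exactly when t is even
theorem pvRange2Succ (t : Nat) :
    PySem.List.pyRange 0 ((t : Int) + 1) 2
      = PySem.List.pyRange 0 (t : Int) 2 ++ (if t % 2 = 0 then [(t : Int)] else []) := by
  rw [PySem.List.pyRange_of_pos _ _ (by norm_num), PySem.List.pyRange_of_pos _ _ (by norm_num)]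
  have h1 : (((t : Int) + 1 - 0 + 2 - 1) / 2).toNat = (t + 2) / 2 := by omega
  have h2 : (((t : Int) - 0 + 2 - 1) / 2).toNat = (t + 1) / 2 := by omega
  have hlt1 : (0 : Int) < (t : Int) + 1 := by positivity
  rw [if_pos hlt1, h1]
  by_cases ht : 0 < (t : Int)
  · rw [if_pos ht, h2]
    rcases Nat.even_or_odd t with he | ho
    · have he' : t % 2 = 0 := Nat.even_iff.mp he
      have hcnt : (t + 2) / 2 = (t + 1) / 2 + 1 := by omega
      rw [hcnt, List.range_succ, List.map_append, he']
      simp only [List.map_cons, List.map_nil]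
      congr 2
      have : (t + 1) / 2 = t / 2 := by omega
      rw [this]
      push_cast [Nat.div_mul_cancel ((Nat.even_iff.mpr he').two_dvd)]
      omega
    · have ho' : t % 2 = 1 := Nat.odd_iff.mp ho
      have hcnt : (t + 2) / 2 = (t + 1) / 2 := by omega
      rw [hcnt, ho']
      simp
  · have ht0 : t = 0 := by omega
    subst ht0
    simp

-- range(1, t+1, 2) gains t exactly when t is odd
theorem pvRange2SuccOdd (t : Nat) :
    PySem.List.pyRange 1 ((t : Int) + 1) 2
      = PySem.List.pyRange 1 (t : Int) 2 ++ (if t % 2 = 1 then [(t : Int)] else []) := by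
  rw [PySem.List.pyRange_of_pos _ _ (by norm_num), PySem.List.pyRange_of_pos _ _ (by norm_num)]
  have h1 : (((t : Int) + 1 - 1 + 2 - 1) / 2).toNat = (t + 1) / 2 := by omega
  have h2 : (((t : Int) - 1 + 2 - 1) / 2).toNat = t / 2 := by omega
  by_cases ht : (1 : Int) < (t : Int) + 1
  · rw [if_pos ht, h1]
    by_cases ht2 : (1 : Int) < (t : Int)
    · rw [if_pos ht2, h2]
      rcases Nat.even_or_odd t with he | ho
      · have he' : t % 2 = 0 := Nat.even_iff.mp he
        have hcnt : (t + 1) / 2 = t / 2 := by omega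
        rw [hcnt, he']
        simp
      · have ho' : t % 2 = 1 := Nat.odd_iff.mp ho
        have hcnt : (t + 1) / 2 = t / 2 + 1 := by omega
        rw [hcnt, List.range_succ, List.map_append, ho']
        simp only [List.map_cons, List.map_nil]
        congr 2
        omega
    · have ht1 : t = 1 := by omega
      subst ht1
      rw [if_neg ht2]
      norm_num [List.range_succ]
  · have ht0 : t = 0 := by omega
    subst ht0
    norm_num

-- A's single parity-splitting loop builds exactly the two stride-2 difference maps
theorem pvBuildEq (a : List Int) (m : Nat) : ∀ (xs ys : List Int),
    (PySem.List.pyRange 0 (m : Int) 1).foldl (pvBStep a) (xs, ys)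
      = (xs ++ (PySem.List.pyRange 0 (m : Int) 2).map (pvFA a),
         ys ++ (PySem.List.pyRange 1 (m : Int) 2).map (pvFB a)) := by
  induction m with
  | zero =>
    intro xs ys
    rw [PySem.List.pyRange_one_eq_nil (by norm_num)]
    rw [PySem.List.pyRange_of_pos _ _ (show (0:Int) < 2 by norm_num)]
    rw [PySem.List.pyRange_of_pos _ _ (show (0:Int) < 2 by norm_num)]
    norm_num
  | succ m ih =>
    intro xs ys
    have hc : ((m + 1 : Nat) : Int) = (m : Int) + 1 := by push_cast; ring
    rw [hc, PySem.List.pyRange_one_succ_right (by positivity), List.foldl_append, ih,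
        pvRange2Succ m, pvRange2SuccOdd m]
    simp only [List.foldl_cons, List.foldl_nil]
    have hm : PySem.Int.mod (m : Int) 2 = ((m % 2 : Nat) : Int) := PySem.Int.mod_natCast m 2
    by_cases hp : m % 2 = 0
    · have hb : (PySem.Int.mod (m : Int) 2 == 0) = true := by rw [hm, hp]; rfl
      rw [if_pos hp, if_neg (by omega : ¬ m % 2 = 1)]
      simp only [pvBStep, hb, if_true, List.append_nil, List.append_assoc,
        List.map_append, List.map_cons, List.map_nil]
      simp [pvFA]
    · have hp1 : m % 2 = 1 := by omega
      have hb : (PySem.Int.mod (m : Int) 2 == 0) = false := by rw [hm, hp1]; rfl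
      rw [if_neg hp, if_pos hp1]
      simp only [pvBStep, hb, Bool.false_eq_true, if_false, List.append_nil, List.append_assoc,
        List.map_append, List.map_cons, List.map_nil]
      simp [pvFB]

-- B's helper on a nonempty list is the running maximum of the Kadane cur-values
theorem pvBestGainEq (x : Int) (t : List Int) :
    solve_bestGain (x :: t) = List.foldl max x (pvCurs x t) := by
  unfold solve_bestGain
  rw [show (fun (st : Int × Int × Int) e =>
        let p := st.1 + e
        (p, min st.2.1 p, max st.2.2 (p - st.2.1))) = pvPStep from rfl]
  simp only [PySem.List.pyGetD_zero_cons, List.foldl_cons]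
  rw [show pvPStep (0, 0, x) x = ((0 + x, min 0 (0 + x), max x (0 + x - 0)) : Int × Int × Int) from rfl]
  rw [pvPref t (0 + x) (min 0 (0 + x)) (max x (0 + x - 0)) x (by omega) (by omega)]
  rw [pvKad_snd]
  norm_num

-- ===== VERDICT (by name: the statement is the Claim_ definition above) =====
theorem solve_spec : Claim_equal_solve := by
  intro n a _ hpre
  unfold Spec_solve
  rcases hpre with ⟨h1, hne⟩ | ⟨h2, hne⟩ | ⟨h3, hlen⟩
  · subst h1; rfl
  · subst h2; rfl
  · obtain ⟨t, hnt⟩ : ∃ t : Nat, n = (t : Int) + 1 := ⟨(n - 1).toNat, by omega⟩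
    subst hnt
    have h2t : (2 : Int) ≤ (t : Int) := by omega
    have hn1 : ((t : Int) + 1 == 1) = false := by simp only [beq_eq_false_iff_ne, ne_eq]; omega
    have hn2 : ((t : Int) + 1 == 2) = false := by simp only [beq_eq_false_iff_ne, ne_eq]; omega
    simp only [solve, solve_alt, hn1, hn2, Bool.false_eq_true, if_false, add_sub_cancel_right]
    refine congrArg₂ (· + ·) rfl ?_
    -- A's builder is pvBStep; rewrite la, lb as stride-2 maps
    have hbuild := pvBuildEq a t [] []
    simp only [List.nil_append] at hbuild
    rw [show (fun (p : List Int × List Int) i =>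
          if PySem.Int.mod i 2 == 0 then
            (p.1 ++ [-(PySem.List.pyGetD a i 0) + PySem.List.pyGetD a (i + 1) 0], p.2)
          else
            (p.1, p.2 ++ [PySem.List.pyGetD a i 0 - PySem.List.pyGetD a (i + 1) 0])) = pvBStep a
        from rfl, hbuild]
    -- B's two difference comprehensions are exactly la and lb
    have hfa : (fun j => PySem.List.pyGetD a (j + 1) 0 - PySem.List.pyGetD a j 0) = pvFA a := by
      funext j; simp only [pvFA]; ring
    rw [hfa, show (fun i => PySem.List.pyGetD a i 0 - PySem.List.pyGetD a (i + 1) 0) = pvFB a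
        from rfl]
    set la := (PySem.List.pyRange 0 (t : Int) 2).map (pvFA a) with hla_def
    set lb := (PySem.List.pyRange 1 (t : Int) 2).map (pvFB a) with hlb_def
    -- A side: nonempty decomposition + scan characterisation
    have hLA : la ≠ [] := by
      refine List.ne_nil_of_mem (List.mem_map_of_mem (a := (0 : Int)) ?_)
      rw [PySem.List.mem_pyRange_iff_of_pos (by norm_num)]
      refine ⟨le_refl 0, by omega, by simp⟩
    have hLB : lb ≠ [] := by
      refine List.ne_nil_of_mem (List.mem_map_of_mem (a := (1 : Int)) ?_)
      rw [PySem.List.mem_pyRange_iff_of_pos (by norm_num)]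
      refine ⟨le_refl 1, by omega, by simp⟩
    obtain ⟨la0, latl, hla⟩ := List.exists_cons_of_ne_nil hLA
    obtain ⟨lb0, lbtl, hlb⟩ := List.exists_cons_of_ne_nil hLB
    rw [hla, hlb, PySem.List.slice_from_one, PySem.List.slice_from_one]
    simp only [List.tail_cons, PySem.List.pyGetD_zero_cons]
    rw [pvScan latl [la0] (by simp), pvScan lbtl [lb0] (by simp)]
    simp only [List.getLast_singleton, List.singleton_append]
    rw [PySem.List.max?_id_cons, PySem.List.max?_id_cons]
    simp only [Option.getD_some]
    rw [pvBestGainEq, pvBestGainEq]
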